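-- pv_equiv track=rewrite | github.com/AnonymitySubmit/DataPool | DataPoolBasicCodeVision2nd/datapool_analysis_overlap.py | topside_expand
-- ===== SOURCE A (Python) =====
-- def topside_expand(target, list1, height, width): # 该函数属于toplef_expand的下属函数
--     side_bool = [] # 初始化布尔矩阵
--
--     # 每个目标都对比一遍其他目标测试两者是否相对,并保存布尔列表
--     for i in range(len(list1)): # 遍历其他目标, 判断相对位置
--         if target[2] > list1[i][0] and target[0] < list1[i][2] and target[1] > list1[i][3]: # x2 > x'1 & x1 < x'2 & y1 > y'2
--             side_bool.append(True) # True: 存在目标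
--         else:
--             side_bool.append(False) # False: 不存在目标
--
--     # 将目标与其他目标的布尔列表进行或操作,得到该目标对面是否存在目标
--     top = False
--     for i in range(len(side_bool)):
--         top = top or side_bool[i]
--
--     side_bool = [] # 废物利用该列表
--
--     # 取得目标的上距
--     if top == True:
--         for i in range(len(list1)):
--             if target[1] > list1[i][3] and target[2] > list1[i][0] and target[0] < list1[i][2]: # y1 > y'2 & x2 > x'1 & x1 < x'2
--                 side_bool.append(target[1] - list1[i][3]) # y1 - y'2, 可能存在多个目标在基准目标正上方
--         return min(side_bool)
--     else:
--         return target[1]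
-- ===== SOURCE B (Python) =====
-- def topside_expand(target, list1, height, width):
--     # one pass tracking the highest bottom edge among overlapping targets above;
--     # min gap = target[1] - max bottom, since min(t1 - y) = t1 - max(y)
--     best = None
--     for row in list1:
--         if target[2] > row[0] and target[0] < row[2] and target[1] > row[3]:
--             if best is None or row[3] > best:
--                 best = row[3]
--     return target[1] if best is None else target[1] - best
-- ===== Notes on version B (the rewrite author's own statement) =====
-- stated objective: simpler
-- what changed: Replaces A's boolean table, OR-reduction pass and gap-list-plus-min passes by a single loop maintaining only the running maximum overlapping bottom edge, returning target[1]-max (or target[1] if none) via the identity min(t1-y)=t1-max(y).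
import Mathlib
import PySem

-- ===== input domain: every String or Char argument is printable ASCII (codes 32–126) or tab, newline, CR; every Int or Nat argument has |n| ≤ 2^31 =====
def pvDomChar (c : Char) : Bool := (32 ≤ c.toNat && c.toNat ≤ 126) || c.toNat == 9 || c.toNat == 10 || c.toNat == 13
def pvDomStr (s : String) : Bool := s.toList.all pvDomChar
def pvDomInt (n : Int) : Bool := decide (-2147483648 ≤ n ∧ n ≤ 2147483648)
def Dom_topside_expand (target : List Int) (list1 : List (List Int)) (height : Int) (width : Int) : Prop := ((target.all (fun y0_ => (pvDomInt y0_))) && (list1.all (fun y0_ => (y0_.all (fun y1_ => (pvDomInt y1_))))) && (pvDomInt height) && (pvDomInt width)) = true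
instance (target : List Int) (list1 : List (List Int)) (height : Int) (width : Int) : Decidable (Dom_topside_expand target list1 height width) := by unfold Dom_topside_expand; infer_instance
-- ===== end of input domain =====

-- ===== PORT A =====
-- B replaces A's boolean table, OR pass and gap-list-plus-min by one loop tracking the maximum overlapping bottom edge (simpler).
-- indexing helper: xs[i]; inside Pre_ every index actually read is in range, so the getD 0 default is never taken
def pvG (xs : List Int) (i : Int) : Int := (PySem.List.pyGet? xs i).getD 0

def topside_expand (target : List Int) (list1 : List (List Int)) (height : Int) (width : Int) : Int :=
  -- first loop: build the boolean list
  let side_bool : List Bool := list1.foldl (fun acc r =>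
    if pvG target 2 > pvG r 0 && pvG target 0 < pvG r 2 && pvG target 1 > pvG r 3 then
      acc ++ [true] else acc ++ [false]) []
  -- second loop: OR-reduction
  let top : Bool := side_bool.foldl (fun t b => t || b) false
  -- third loop + min, or the else branch
  if top = true then
    let gaps : List Int := list1.foldl (fun acc r =>
      if pvG target 1 > pvG r 3 && pvG target 2 > pvG r 0 && pvG target 0 < pvG r 2 then
        acc ++ [pvG target 1 - pvG r 3] else acc) []
    (PySem.List.min? gaps (fun x => x)).getD 0   -- Python min raises on []; top = true guarantees non-empty
  else
    pvG target 1

-- ===== PORT B =====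
def topside_expand_alt (target : List Int) (list1 : List (List Int)) (height : Int) (width : Int) : Int :=
  let best : Option Int := list1.foldl (fun b r =>
    if pvG target 2 > pvG r 0 && pvG target 0 < pvG r 2 && pvG target 1 > pvG r 3 then
      match b with
      | none => some (pvG r 3)
      | some m => if pvG r 3 > m then some (pvG r 3) else some m
    else b) none
  match best with
  | none => pvG target 1
  | some m => pvG target 1 - m

-- ===== PRECONDITION & SPEC =====
-- Pre_ excludes exactly the inputs where Python A raises IndexError, accounting for `and` short-circuit:
-- target too short for the indices read, or a row too short for the comparisons actually reached
-- (rows may be short when every row's overlap test fails before its missing index, so top stays False).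
def pvRowFails (target : List Int) (r : List Int) : Prop :=
  (1 ≤ r.length ∧ ¬(pvG target 2 > pvG r 0)) ∨
  (3 ≤ r.length ∧ pvG target 2 > pvG r 0 ∧ ¬(pvG target 0 < pvG r 2)) ∨
  (4 ≤ r.length ∧ pvG target 2 > pvG r 0 ∧ pvG target 0 < pvG r 2 ∧ ¬(pvG target 1 > pvG r 3))
def Pre_topside_expand (target : List Int) (list1 : List (List Int)) (height : Int) (width : Int) : Prop :=
  if list1 = [] then 2 ≤ target.length
  else 3 ≤ target.length ∧ ((∀ r ∈ list1, 4 ≤ r.length) ∨ (∀ r ∈ list1, pvRowFails target r))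
instance (target : List Int) (list1 : List (List Int)) (height : Int) (width : Int) : Decidable (Pre_topside_expand target list1 height width) := by unfold Pre_topside_expand pvRowFails; infer_instance
def pvWitness_topside_expand : List Int × List (List Int) × Int × Int := ([0, 10, 6], [[1, 0, 4, 3], [0, 0, 2, 7]], 20, 20)

def Spec_topside_expand (target : List Int) (list1 : List (List Int)) (height : Int) (width : Int) (out : Int) : Prop := out = topside_expand_alt target list1 height width
instance (target : List Int) (list1 : List (List Int)) (height : Int) (width : Int) (out : Int) : Decidable (Spec_topside_expand target list1 height width out) := by unfold Spec_topside_expand; infer_instance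

-- ===== CLAIM (what is proved, stated in full; the proofs are below) =====
def Claim_equal_topside_expand : Prop := ∀ (target : List Int) (list1 : List (List Int)) (height : Int) (width : Int), Dom_topside_expand target list1 height width → Pre_topside_expand target list1 height width → Spec_topside_expand target list1 height width (topside_expand target list1 height width)

-- ===== LEMMAS AND PROOFS =====
theorem pv_foldl_bools {α : Type} (f : α → Bool) (l : List α) (acc : List Bool) :
    l.foldl (fun a r => if f r then a ++ [true] else a ++ [false]) acc = acc ++ l.map f := by
  induction l generalizing acc with
  | nil => simp
  | cons x t ih => by_cases h : f x <;> simp [h, ih]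

theorem pv_foldl_or (l : List Bool) (b : Bool) :
    l.foldl (fun t x => t || x) b = (b || l.any id) := by
  induction l generalizing b with
  | nil => simp
  | cons x t ih => simp [List.foldl, ih, Bool.or_assoc]

theorem pv_foldl_gaps {α : Type} (f : α → Bool) (g : α → Int) (l : List α) (acc : List Int) :
    l.foldl (fun a r => if f r then a ++ [g r] else a) acc
      = acc ++ l.filterMap (fun r => if f r then some (g r) else none) := by
  induction l generalizing acc with
  | nil => simp
  | cons x t ih => by_cases h : f x <;> simp [h, ih]

theorem pv_and_rot (a b c : Bool) : ((c && a) && b) = ((a && b) && c) := by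
  cases a <;> cases b <;> cases c <;> rfl

-- B's loop over list1 equals the running-max step folded over the filtered bottoms
theorem pv_foldl_best {α : Type} (f : α → Bool) (g : α → Int) (l : List α) (b : Option Int) :
    l.foldl (fun b r =>
        if f r then
          match b with
          | none => some (g r)
          | some m => if g r > m then some (g r) else some m
        else b) b
      = (l.filterMap (fun r => if f r then some (g r) else none)).foldl
          (fun b x => match b with
            | none => some x
            | some m => if x > m then some x else some m) b := by
  induction l generalizing b with
  | nil => simp
  | cons x t ih => by_cases h : f x <;> simp [h, ih]

theorem pv_best_some (t : List Int) (m : Int) :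
    t.foldl (fun b x => match b with
        | none => some x
        | some m => if x > m then some x else some m) (some m)
      = some (t.foldl max m) := by
  induction t generalizing m with
  | nil => simp
  | cons x s ih =>
      have h : (if x > m then some x else some m) = some (max m x) := by
        by_cases h : x > m <;> simp [h, max_def] <;> omega
      simp [List.foldl, h, ih]

theorem pv_min_map_sub (c : Int) (t : List Int) (x : Int) :
    (t.map (fun y => c - y)).foldl min (c - x) = c - t.foldl max x := by
  induction t generalizing x with
  | nil => simp
  | cons a s ih =>
      have h : min (c - x) (c - a) = c - max x a := by
        simp [min_def, max_def]; split_ifs <;> omega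
      simp [List.foldl, h, ih]

theorem topside_expand_spec : Claim_equal_topside_expand := by
  intro target list1 height width _ _
  unfold Spec_topside_expand topside_expand topside_expand_alt
  simp only [pv_foldl_bools, pv_foldl_gaps, pv_foldl_best, List.nil_append, pv_foldl_or,
    Bool.false_or]
  set c2 : List Int → Bool := fun r =>
    pvG target 2 > pvG r 0 && pvG target 0 < pvG r 2 && pvG target 1 > pvG r 3 with hc2
  have hcc : ∀ r, (pvG target 1 > pvG r 3 && pvG target 2 > pvG r 0 && pvG target 0 < pvG r 2) = c2 r := by
    intro r; rw [hc2]; exact pv_and_rot _ _ _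
  simp only [hcc]
  set bots : List Int := list1.filterMap (fun r => if c2 r then some (pvG r 3) else none) with hb
  have hgaps : list1.filterMap (fun r => if c2 r then some (pvG target 1 - pvG r 3) else none)
      = bots.map (fun y => pvG target 1 - y) := by
    rw [hb, List.map_filterMap]
    refine List.filterMap_congr (fun r _ => ?_)
    by_cases h : c2 r <;> simp [h]
  have hany : ((list1.map c2).any id = true) ↔ bots ≠ [] := by
    rw [hb, Ne, List.filterMap_eq_nil_iff]
    simp only [List.any_map, List.any_eq_true, Function.comp]
    constructor
    · rintro ⟨r, hr, h⟩ hall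
      have hrb : c2 r = true := by simpa using h
      have := hall r hr
      simp [hrb] at this
    · intro h
      by_contra hno
      push_neg at hno
      refine h (fun r hr => ?_)
      have hrb : c2 r = false := by simpa using hno r hr
      simp [hrb]
  rw [hgaps]
  cases hbe : bots with
  | nil =>
      have htop : (list1.map c2).any id = false := by
        by_contra h
        exact (hany.mp (by simpa using h)) hbe
      simp [htop]
  | cons x t =>
      have htop : (list1.map c2).any id = true := hany.mpr (by simp [hbe])
      simp only [htop, if_pos rfl, List.map_cons, List.foldl_cons]
      rw [PySem.List.min?_id_cons, pv_best_some, pv_min_map_sub]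
      simp
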